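-- pv_equiv track=rewrite | github.com/burzomir/AoC2024 | src/day_08/part_2.py | anti_node_generator
-- ===== SOURCE A (Python) =====
-- def anti_node_generator(map_width, map_height, p1, p2):
--     while True:
--         n = make_anti_node(p1, p2)
--         if is_on_map(map_width, map_height, n):
--             yield n
--             p1, p2 = p2, n
--         else:
--             return
--
-- def is_on_map(map_width, map_heigth, point):
--     x, y = point
--     return x >= 0 and y >= 0 and x < map_width and y < map_heigth
--
-- def get_distance(p1: tuple[int, int], p2: tuple[int, int]):
--     x1, y1 = p1
--     x2, y2 = p2
--     return abs(x2 - x1) + abs(y2 - y1)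
--
-- def get_direction(p1: tuple[int, int], p2: tuple[int, int]):
--     x1, y1 = p1
--     x2, y2 = p2
--     dx = x2 - x1
--     dy = y2 - y1
--     return (dx, dy)
--
-- def make_anti_node(p1: tuple[int, int], p2: tuple[int, int]):
--     x2, y2 = p2
--     distance = get_distance(p1, p2)
--     dx, dy = get_direction(p1, p2)
--     if abs(dx) >= distance:
--         x3 = x2 + (distance if dx > 0 else -distance)
--         y3 = y2
--     else:
--         x3 = x2 + dx
--         remaining_distance = distance - abs(dx)
--         y3 = y2 + (remaining_distance if dy > 0 else -remaining_distance)
--     return (x3, y3)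
-- ===== SOURCE B (Python) =====
-- def anti_node_generator(map_width, map_height, p1, p2):
--     # Closed form: the i-th anti-node is p2 + i*(p2 - p1).  Compute, per axis,
--     # the first step index that leaves the map, take the minimum, and emit the
--     # surviving points with a range loop -- no per-step bounds test.
--     x0, y0 = p2
--     dx = x0 - p1[0]
--     dy = y0 - p1[1]
--     ex = _first_exit(x0, dx, map_width)
--     ey = _first_exit(y0, dy, map_height)
--     if ex is None and ey is None:
--         # the line never leaves the map: every step yields the same on-map point
--         while True:
--             yield (x0, y0)
--     k = min(e for e in (ex, ey) if e is not None) - 1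
--     for i in range(1, k + 1):
--         yield (x0 + i * dx, y0 + i * dy)
--
-- def _first_exit(s, d, w):
--     # smallest i >= 1 with s + i*d outside [0, w), or None if there is none
--     if d == 0:
--         return None if 0 <= s < w else 1
--     if not (0 <= s + d < w):
--         return 1
--     if d > 0:
--         return (w - s + d - 1) // d
--     return s // (-d) + 1
-- ===== Notes on version B (the rewrite author's own statement) =====
-- stated objective: alternative
-- what changed: B replaces A's step-by-step walk (recompute anti-node, Manhattan distance, direction and a two-branch case split, then test the map each iteration) by a closed-form count: per axis it computes arithmetically the first step index leaving the map, takes the minimum k, and emits the k anti-nodes p2+i*(p2-p1) with a plain range loop.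
import Mathlib
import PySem

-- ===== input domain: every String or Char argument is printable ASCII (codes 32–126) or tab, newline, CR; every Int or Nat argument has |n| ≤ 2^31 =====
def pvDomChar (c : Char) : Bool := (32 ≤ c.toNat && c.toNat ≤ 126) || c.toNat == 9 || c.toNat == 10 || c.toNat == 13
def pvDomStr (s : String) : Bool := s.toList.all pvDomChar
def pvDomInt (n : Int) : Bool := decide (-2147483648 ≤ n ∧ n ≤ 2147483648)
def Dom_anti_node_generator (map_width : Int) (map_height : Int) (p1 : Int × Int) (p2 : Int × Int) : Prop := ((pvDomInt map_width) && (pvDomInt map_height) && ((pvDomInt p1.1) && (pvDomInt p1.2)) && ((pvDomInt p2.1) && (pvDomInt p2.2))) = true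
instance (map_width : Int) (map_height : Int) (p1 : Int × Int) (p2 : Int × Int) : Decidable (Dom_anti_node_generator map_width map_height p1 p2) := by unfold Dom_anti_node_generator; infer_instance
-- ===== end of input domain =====

-- Header: B drops A's per-step distance/direction/branch walk and instead computes the
-- number of on-map anti-nodes in closed form (first-exit index per axis), then emits
-- p2 + i*(p2-p1) with a range loop (objective: alternative). A's generator is ported as
-- the list of yielded values with a fuel bound sufficient wherever the generator is finite.

-- ===== PORT A =====
def pvGetDistance (p1 : Int × Int) (p2 : Int × Int) : Int :=
  |p2.1 - p1.1| + |p2.2 - p1.2|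

def pvGetDirection (p1 : Int × Int) (p2 : Int × Int) : Int × Int :=
  (p2.1 - p1.1, p2.2 - p1.2)

def pvMakeAntiNode (p1 : Int × Int) (p2 : Int × Int) : Int × Int :=
  let distance := pvGetDistance p1 p2
  let d := pvGetDirection p1 p2
  let dx := d.1
  let dy := d.2
  if |dx| ≥ distance then
    (p2.1 + (if dx > 0 then distance else -distance), p2.2)
  else
    let remaining := distance - |dx|
    (p2.1 + dx, p2.2 + (if dy > 0 then remaining else -remaining))

def pvIsOnMap (map_width : Int) (map_height : Int) (point : Int × Int) : Bool :=
  point.1 ≥ 0 && point.2 ≥ 0 && point.1 < map_width && point.2 < map_height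

def pvLoopA (map_width : Int) (map_height : Int) : Nat → (Int × Int) → (Int × Int) → List (Int × Int)
  | 0, _, _ => []
  | fuel + 1, p1, p2 =>
    let n := pvMakeAntiNode p1 p2
    if pvIsOnMap map_width map_height n then
      n :: pvLoopA map_width map_height fuel p2 n
    else
      []

def anti_node_generator (map_width : Int) (map_height : Int) (p1 : Int × Int) (p2 : Int × Int) : List (Int × Int) :=
  pvLoopA map_width map_height (map_width.toNat + map_height.toNat + 4) p1 p2

-- ===== PORT B =====
-- smallest i >= 1 with s + i*d outside [0, w), or none if there is none
def pvFirstExit (s d w : Int) : Option Int :=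
  if d = 0 then (if 0 ≤ s ∧ s < w then none else some 1)
  else if ¬ (0 ≤ s + d ∧ s + d < w) then some 1
  else if d > 0 then some (PySem.Int.floordiv (w - s + d - 1) d)
  else some (PySem.Int.floordiv s (-d) + 1)

def pvEmit (x0 y0 dx dy k : Int) : List (Int × Int) :=
  (PySem.List.pyRange 1 (k + 1) 1).map (fun i => (x0 + i * dx, y0 + i * dy))

def anti_node_generator_alt (map_width : Int) (map_height : Int) (p1 : Int × Int) (p2 : Int × Int) : List (Int × Int) :=
  let x0 := p2.1
  let y0 := p2.2
  let dx := x0 - p1.1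
  let dy := y0 - p1.2
  match pvFirstExit x0 dx map_width, pvFirstExit y0 dy map_height with
  | none, none => []  -- Python B yields (x0, y0) forever here; excluded by Pre_
  | some m, none => pvEmit x0 y0 dx dy (m - 1)
  | none, some m => pvEmit x0 y0 dx dy (m - 1)
  | some mx, some my => pvEmit x0 y0 dx dy (min mx my - 1)

-- ===== PRECONDITION & SPEC =====
-- Pre_ excludes exactly the inputs on which A's generator never returns (it diverges,
-- yielding forever): p1 = p2 with p2 on the map.
def Pre_anti_node_generator (map_width : Int) (map_height : Int) (p1 : Int × Int) (p2 : Int × Int) : Prop :=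
  ¬ (p1 = p2 ∧ 0 ≤ p2.1 ∧ p2.1 < map_width ∧ 0 ≤ p2.2 ∧ p2.2 < map_height)
instance (map_width : Int) (map_height : Int) (p1 : Int × Int) (p2 : Int × Int) : Decidable (Pre_anti_node_generator map_width map_height p1 p2) := by unfold Pre_anti_node_generator; infer_instance

def pvWitness_anti_node_generator : Int × Int × (Int × Int) × (Int × Int) := (5, 5, (0, 0), (1, 1))

def Spec_anti_node_generator (map_width : Int) (map_height : Int) (p1 : Int × Int) (p2 : Int × Int) (out : List (Int × Int)) : Prop := out = anti_node_generator_alt map_width map_height p1 p2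
instance (map_width : Int) (map_height : Int) (p1 : Int × Int) (p2 : Int × Int) (out : List (Int × Int)) : Decidable (Spec_anti_node_generator map_width map_height p1 p2 out) := by unfold Spec_anti_node_generator; infer_instance

-- ===== CLAIM (what is proved, stated in full; the proofs are below) =====
def Claim_equal_anti_node_generator : Prop := ∀ (map_width : Int) (map_height : Int) (p1 : Int × Int) (p2 : Int × Int), Dom_anti_node_generator map_width map_height p1 p2 → Pre_anti_node_generator map_width map_height p1 p2 → Spec_anti_node_generator map_width map_height p1 p2 (anti_node_generator map_width map_height p1 p2)

-- ===== LEMMAS AND PROOFS =====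

-- A's anti-node is the reflection of p1 over p2.
theorem pvMakeAntiNode_eq (p1 p2 : Int × Int) :
    pvMakeAntiNode p1 p2 = (2 * p2.1 - p1.1, 2 * p2.2 - p1.2) := by
  unfold pvMakeAntiNode pvGetDistance pvGetDirection
  dsimp only
  rcases abs_cases (p2.1 - p1.1) with ⟨ha1, ha2⟩ | ⟨ha1, ha2⟩ <;>
    rcases abs_cases (p2.2 - p1.2) with ⟨hb1, hb2⟩ | ⟨hb1, hb2⟩ <;>
    split_ifs <;> refine Prod.ext ?_ ?_ <;> dsimp only <;> omega

theorem pvIsOnMap_iff (w h x y : Int) :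
    pvIsOnMap w h (x, y) = true ↔ (0 ≤ x ∧ x < w ∧ 0 ≤ y ∧ y < h) := by
  simp [pvIsOnMap]; omega

-- canonical form of A's walk: points indexed from i, while on map, fuel-bounded
def pvCanon (w h x0 y0 dx dy : Int) : Nat → Int → List (Int × Int)
  | 0, _ => []
  | fuel + 1, i =>
    if pvIsOnMap w h (x0 + i * dx, y0 + i * dy) then
      (x0 + i * dx, y0 + i * dy) :: pvCanon w h x0 y0 dx dy fuel (i + 1)
    else []

theorem pvLoopA_eq_canon (w h x0 y0 dx dy : Int) : ∀ (fuel : Nat) (i : Int),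
    pvLoopA w h fuel (x0 + (i - 1) * dx, y0 + (i - 1) * dy) (x0 + i * dx, y0 + i * dy) =
      pvCanon w h x0 y0 dx dy fuel (i + 1) := by
  intro fuel
  induction fuel with
  | zero => intro i; rfl
  | succ f ih =>
    intro i
    simp only [pvLoopA, pvCanon, pvMakeAntiNode_eq]
    have e1 : 2 * (x0 + i * dx) - (x0 + (i - 1) * dx) = x0 + (i + 1) * dx := by ring
    have e2 : 2 * (y0 + i * dy) - (y0 + (i - 1) * dy) = y0 + (i + 1) * dy := by ring
    rw [e1, e2]
    have := ih (i + 1)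
    rw [show i + 1 - 1 = i from by ring] at this
    rw [this]

theorem firstExit_none_iff (s d w : Int) :
    pvFirstExit s d w = none ↔ (d = 0 ∧ 0 ≤ s ∧ s < w) := by
  unfold pvFirstExit
  split_ifs with h1 h2 h3 h4 <;> simp_all

theorem firstExit_some (s d w m : Int) (hm : pvFirstExit s d w = some m) :
    1 ≤ m ∧ ¬ (0 ≤ s + m * d ∧ s + m * d < w) ∧
      ∀ i, 1 ≤ i → i < m → (0 ≤ s + i * d ∧ s + i * d < w) := by
  by_cases h1 : d = 0
  · by_cases h2 : 0 ≤ s ∧ s < w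
    · simp [pvFirstExit, h1, h2] at hm
    · have hm' : (1 : Int) = m := by simpa [pvFirstExit, h1, h2] using hm
      subst hm'; subst h1
      exact ⟨le_refl 1, by simpa using h2, fun i h1i hi1 => by omega⟩
  · by_cases h3 : 0 ≤ s + d ∧ s + d < w
    · obtain ⟨hs0, hsw⟩ := h3
      by_cases h4 : d > 0
      · have hm' : PySem.Int.floordiv (w - s + d - 1) d = m := by
          simpa [pvFirstExit, h1, hs0, hsw, h4] using hm
        subst hm'
        have hle : PySem.Int.floordiv (w - s + d - 1) d * d ≤ w - s + d - 1 :=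
          (PySem.Int.le_floordiv_iff_mul_le h4).mp (le_refl _)
        have hlt : w - s + d - 1 <
            (PySem.Int.floordiv (w - s + d - 1) d + 1) * d :=
          (PySem.Int.floordiv_lt_iff_lt_mul h4).mp (by omega)
        set q := PySem.Int.floordiv (w - s + d - 1) d with hq
        have hmd : w - s - 1 < q * d := by nlinarith
        have hm1 : 1 ≤ q := by nlinarith
        refine ⟨hm1, ?_, ?_⟩
        · intro ⟨_, hx⟩; nlinarith
        · intro i h1i him
          have hA : 0 ≤ (i - 1) * d := mul_nonneg (by omega) (le_of_lt h4)
          have hB : i * d ≤ (q - 1) * d :=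
            mul_le_mul_of_nonneg_right (by omega) (le_of_lt h4)
          constructor <;> nlinarith
      · have hm' : PySem.Int.floordiv s (-d) + 1 = m := by
          simpa [pvFirstExit, h1, hs0, hsw, h4] using hm
        have hd : 0 < -d := by omega
        have hle : (m - 1) * (-d) ≤ s :=
          (PySem.Int.le_floordiv_iff_mul_le hd).mp (by omega)
        have hlt : s < m * (-d) :=
          (PySem.Int.floordiv_lt_iff_lt_mul hd).mp (by omega)
        have hm1 : 1 ≤ m := by
          have : (0 : Int) ≤ PySem.Int.floordiv s (-d) :=
            (PySem.Int.le_floordiv_iff_mul_le hd).mpr (by nlinarith)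
          omega
        refine ⟨hm1, ?_, ?_⟩
        · intro ⟨hx, _⟩; nlinarith
        · intro i h1i him
          have hA : i * (-d) ≤ (m - 1) * (-d) :=
            mul_le_mul_of_nonneg_right (by omega) (le_of_lt hd)
          have hB : (i - 1) * (-d) ≥ 0 := mul_nonneg (by omega) (le_of_lt hd)
          constructor <;> nlinarith
    · have hm' : (1 : Int) = m := by simpa [pvFirstExit, h1, h3] using hm
      subst hm'
      exact ⟨le_refl 1, by simpa using h3, fun i h1i hi1 => by omega⟩

theorem firstExit_bound (s d w m : Int) (hm : pvFirstExit s d w = some m) :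
    m = 1 ∨ m ≤ w + 2 := by
  by_cases h1 : d = 0
  · by_cases h2 : 0 ≤ s ∧ s < w
    · simp [pvFirstExit, h1, h2] at hm
    · left; exact (by simpa [pvFirstExit, h1, h2] using hm : (1 : Int) = m).symm
  · by_cases h3 : 0 ≤ s + d ∧ s + d < w
    · obtain ⟨hs0, hsw⟩ := h3
      by_cases h4 : d > 0
      · right
        have hm' : PySem.Int.floordiv (w - s + d - 1) d = m := by
          simpa [pvFirstExit, h1, hs0, hsw, h4] using hm
        subst hm'
        have hle : PySem.Int.floordiv (w - s + d - 1) d * d ≤ w - s + d - 1 :=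
          (PySem.Int.le_floordiv_iff_mul_le h4).mp (le_refl _)
        nlinarith
      · right
        have hm' : PySem.Int.floordiv s (-d) + 1 = m := by
          simpa [pvFirstExit, h1, hs0, hsw, h4] using hm
        have hd : 0 < -d := by omega
        have hle : (m - 1) * (-d) ≤ s :=
          (PySem.Int.le_floordiv_iff_mul_le hd).mp (by omega)
        nlinarith
    · left; exact (by simpa [pvFirstExit, h1, h3] using hm : (1 : Int) = m).symm

theorem pvCanon_emit (w h x0 y0 dx dy m : Int)
    (hval : ∀ i, 1 ≤ i → i < m →
      (0 ≤ x0 + i * dx ∧ x0 + i * dx < w ∧ 0 ≤ y0 + i * dy ∧ y0 + i * dy < h))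
    (hinv : ¬ (0 ≤ x0 + m * dx ∧ x0 + m * dx < w ∧ 0 ≤ y0 + m * dy ∧ y0 + m * dy < h)) :
    ∀ (fuel : Nat) (j : Int), 1 ≤ j → j ≤ m → m.toNat < fuel + j.toNat →
      pvCanon w h x0 y0 dx dy fuel j =
        (PySem.List.pyRange j m 1).map (fun i => (x0 + i * dx, y0 + i * dy)) := by
  intro fuel
  induction fuel with
  | zero => intro j h1j hjm hf; omega
  | succ f ih =>
    intro j h1j hjm hf
    simp only [pvCanon]
    by_cases hj : j < m
    · rw [if_pos ((pvIsOnMap_iff w h _ _).mpr (by have := hval j h1j hj; tauto))]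
      rw [PySem.List.pyRange_one_cons (by omega)]
      simp only [List.map_cons]
      rw [ih (j + 1) (by omega) (by omega) (by omega)]
    · have hjm' : j = m := by omega
      rw [if_neg (by rw [pvIsOnMap_iff, hjm']; tauto)]
      rw [PySem.List.pyRange_one, show (m - j).toNat = 0 from by omega]
      simp

-- ===== VERDICT (by name: the statement is the Claim_ definition above) =====
theorem anti_node_generator_spec : Claim_equal_anti_node_generator := by
  intro mw mh p1 p2 _ hpre
  obtain ⟨a, b⟩ := p1
  obtain ⟨c, d⟩ := p2
  unfold Spec_anti_node_generator anti_node_generator anti_node_generator_alt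
  dsimp only
  have hA : pvLoopA mw mh (mw.toNat + mh.toNat + 4) (a, b) (c, d) =
      pvCanon mw mh c d (c - a) (d - b) (mw.toNat + mh.toNat + 4) 1 := by
    have hp1 : (a, b) = (c + (0 - 1) * (c - a), d + (0 - 1) * (d - b)) := by
      refine Prod.ext ?_ ?_ <;> dsimp <;> ring
    have hp2 : (c, d) = (c + 0 * (c - a), d + 0 * (d - b)) := by
      refine Prod.ext ?_ ?_ <;> dsimp <;> ring
    rw [hp1, hp2, pvLoopA_eq_canon]
    norm_num
  rw [hA]
  rcases hex : pvFirstExit c (c - a) mw with _ | mx <;>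
    rcases hey : pvFirstExit d (d - b) mh with _ | my <;>
      simp only [pvEmit]
  · -- both none: excluded by Pre_
    obtain ⟨hdx0, hx1, hx2⟩ := (firstExit_none_iff _ _ _).mp hex
    obtain ⟨hdy0, hy1, hy2⟩ := (firstExit_none_iff _ _ _).mp hey
    exact absurd ⟨Prod.ext (by dsimp; omega) (by dsimp; omega), hx1, hx2, hy1, hy2⟩ hpre
  · -- x never exits, y exits at my
    obtain ⟨hdx0, hx1, hx2⟩ := (firstExit_none_iff _ _ _).mp hex
    obtain ⟨hm1, hinv, hval⟩ := firstExit_some _ _ _ _ hey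
    rw [show my - 1 + 1 = my from by ring]
    refine pvCanon_emit mw mh c d (c - a) (d - b) my ?_ ?_ _ 1 (le_refl 1) hm1 ?_
    · intro i h1i him
      have hv := hval i h1i him
      rw [hdx0]
      simp only [mul_zero, add_zero]
      exact ⟨hx1, hx2, hv.1, hv.2⟩
    · rw [hdx0]
      intro ⟨_, _, hy3, hy4⟩; exact hinv ⟨hy3, hy4⟩
    · rcases firstExit_bound _ _ _ _ hey with h | h <;> omega
  · -- y never exits, x exits at mx
    obtain ⟨hdy0, hy1, hy2⟩ := (firstExit_none_iff _ _ _).mp hey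
    obtain ⟨hm1, hinv, hval⟩ := firstExit_some _ _ _ _ hex
    rw [show mx - 1 + 1 = mx from by ring]
    refine pvCanon_emit mw mh c d (c - a) (d - b) mx ?_ ?_ _ 1 (le_refl 1) hm1 ?_
    · intro i h1i him
      have hv := hval i h1i him
      rw [hdy0]
      simp only [mul_zero, add_zero]
      exact ⟨hv.1, hv.2, hy1, hy2⟩
    · rw [hdy0]
      intro ⟨hx3, hx4, _, _⟩; exact hinv ⟨hx3, hx4⟩
    · rcases firstExit_bound _ _ _ _ hex with h | h <;> omega
  · -- both exit: min of the two first exits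
    obtain ⟨hmx1, hinvx, hvalx⟩ := firstExit_some _ _ _ _ hex
    obtain ⟨hmy1, hinvy, hvaly⟩ := firstExit_some _ _ _ _ hey
    rw [show min mx my - 1 + 1 = min mx my from by ring]
    refine pvCanon_emit mw mh c d (c - a) (d - b) (min mx my) ?_ ?_ _ 1 (le_refl 1)
      (le_min hmx1 hmy1) ?_
    · intro i h1i him
      have h1 := hvalx i h1i (lt_of_lt_of_le him (min_le_left _ _))
      have h2 := hvaly i h1i (lt_of_lt_of_le him (min_le_right _ _))
      exact ⟨h1.1, h1.2, h2.1, h2.2⟩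
    · rcases le_total mx my with hle | hle
      · rw [min_eq_left hle]; intro ⟨hx3, hx4, _, _⟩; exact hinvx ⟨hx3, hx4⟩
      · rw [min_eq_right hle]; intro ⟨_, _, hy3, hy4⟩; exact hinvy ⟨hy3, hy4⟩
    · rcases firstExit_bound _ _ _ _ hex with h | h <;> omega
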